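-- pv_equiv track=rewrite | github.com/AdamRickards/napalm-hios | tools/mohawc/mohawc.py | compute_reset_order
-- ===== SOURCE A (Python) =====
-- def compute_reset_order(graph, entry_ip):
--     """BFS from entry, return IPs sorted furthest-first."""
--     distances = {entry_ip: 0}
--     queue = [entry_ip]
--     while queue:
--         current = queue.pop(0)
--         for neighbor in graph.get(current, []):
--             if neighbor not in distances:
--                 distances[neighbor] = distances[current] + 1
--                 queue.append(neighbor)
--
--     # Devices not reachable via LLDP get max distance (reset them first)
--     max_dist = max(distances.values(), default=0) + 1
--     all_ips = list(graph.keys())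
--     for ip in all_ips:
--         if ip not in distances:
--             distances[ip] = max_dist
--
--     return sorted(all_ips, key=lambda ip: -distances[ip]), distances
-- ===== SOURCE B (Python) =====
-- def compute_reset_order(graph, entry_ip):
--     """Indexed BFS over a (node, dist) discovery list with a visited set,
--     then a counting/bucket sort by distance instead of a comparison sort."""
--     seen = {entry_ip}
--     order = [(entry_ip, 0)]
--     i = 0
--     while i < len(order):
--         node, dist = order[i]
--         i += 1
--         for neighbor in graph.get(node, []):
--             if neighbor not in seen:
--                 seen.add(neighbor)
--                 order.append((neighbor, dist + 1))
--     distances = dict(order)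
--     max_dist = max(distances.values(), default=0) + 1
--     buckets = [[] for _ in range(max_dist + 1)]
--     for ip in graph:
--         if ip in distances:
--             buckets[distances[ip]].append(ip)
--         else:
--             distances[ip] = max_dist
--             buckets[max_dist].append(ip)
--     result = []
--     for bucket in reversed(buckets):
--         result += bucket
--     return result, distances
-- ===== Notes on version B (the rewrite author's own statement) =====
-- stated objective: alternative
-- what changed: B replaces A's dict-carrying FIFO BFS (queue.pop(0), distance looked up in the dict) by an indexed scan over a growing (node, dist) discovery list with a separate visited set, builds the distance dict once from that list, and replaces sorted(all_ips, key=-dist) by a counting/bucket sort: one bucket per distance value, filled in key order and concatenated from the farthest bucket down.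
import Mathlib
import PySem

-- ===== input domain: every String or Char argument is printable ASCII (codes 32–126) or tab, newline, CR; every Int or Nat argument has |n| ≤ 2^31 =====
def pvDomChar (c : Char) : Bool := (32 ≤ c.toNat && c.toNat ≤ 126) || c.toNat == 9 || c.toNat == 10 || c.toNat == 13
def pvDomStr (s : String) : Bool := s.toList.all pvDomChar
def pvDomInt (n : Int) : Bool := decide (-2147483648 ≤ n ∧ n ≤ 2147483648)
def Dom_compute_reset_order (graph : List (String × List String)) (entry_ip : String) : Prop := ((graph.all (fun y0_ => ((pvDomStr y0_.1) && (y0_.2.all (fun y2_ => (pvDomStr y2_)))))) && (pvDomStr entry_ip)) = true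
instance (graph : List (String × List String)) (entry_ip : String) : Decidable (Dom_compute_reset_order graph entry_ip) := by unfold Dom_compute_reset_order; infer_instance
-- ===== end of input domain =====

-- B replaces A's dict-carrying FIFO BFS by an indexed scan over a (node, dist)
-- discovery list with a visited set, and replaces the comparison sort by a
-- counting/bucket sort over the distance values; return values are identical.

-- shared helper of both ports: graph.get(x, [])
def pvNbrs (graph : List (String × List String)) (x : String) : List String :=
  (PySem.Dict.mk graph).getD x []

-- A's BFS inner step: 'if neighbor not in distances: distances[neighbor] = v; queue.append(neighbor)'
def pvStep (v : PySem.Dict String Int → Int)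
    (st : PySem.Dict String Int × List String) (n : String) :
    PySem.Dict String Int × List String :=
  if st.1.contains n = false then (st.1.insert n (v st.1), st.2 ++ [n]) else st

-- termination bookkeeping (cited by the ports' decreasing_by): every node ever inserted
-- during either loop is a neighbour occurring in the graph, and each insertion is fresh.
def pvUni (graph : List (String × List String)) : List String :=
  (graph.flatMap Prod.snd).dedup

-- ===== PORT A =====
-- A's BFS: a single FIFO queue, queue.pop(0), value distances[current] + 1.
-- The fuel argument only makes the while-loop recursion structural: one queue element is
-- consumed per round and every enqueued node beyond the entry is a fresh neighbour occurring
-- in the graph, so (pvUni graph).length + 1 rounds always suffice and the 0-guard never fires.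
def pvALoop (graph : List (String × List String)) :
    Nat → PySem.Dict String Int → List String → PySem.Dict String Int
  | 0, d, _ => d
  | fuel + 1, d, q =>
      match q with
      | [] => d
      | current :: rest =>
          let st := (pvNbrs graph current).foldl
            (pvStep (fun dd => dd.getD current 0 + 1)) (d, rest)
          pvALoop graph fuel st.1 st.2

def compute_reset_order (graph : List (String × List String)) (entry_ip : String) :
    List String × (List (String × Int)) :=
  let distances := pvALoop graph ((pvUni graph).length + 1) (PySem.Dict.empty.insert entry_ip 0) [entry_ip]
  let max_dist := (PySem.List.maxD distances.values (fun v => v) 0) + 1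
  let all_ips := (PySem.Dict.mk graph).keys
  let distances := all_ips.foldl
    (fun d ip => if d.contains ip = false then d.insert ip max_dist else d) distances
  (PySem.List.sorted all_ips (fun ip => -(distances.getD ip 0)), distances.items)

-- ===== PORT B =====
-- B's BFS inner step: 'if neighbor not in seen: seen.add(neighbor); order.append((neighbor, w))'
def pvBStep (w : Int) (st : PySem.Set String × List (String × Int)) (n : String) :
    PySem.Set String × List (String × Int) :=
  if PySem.Set.contains st.1 n = false then (PySem.Set.add st.1 n, st.2 ++ [(n, w)]) else st

-- B's BFS: scan the growing discovery list by index (no pop(0)); the same fuel bound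
-- (one round per index step, at most 1 + |pvUni graph| list entries) makes it structural.
def pvBScan (graph : List (String × List String)) :
    Nat → PySem.Set String → List (String × Int) → Nat → List (String × Int)
  | 0, _, ord, _ => ord
  | fuel + 1, seen, ord, i =>
      if h : i < ord.length then
        let st := (pvNbrs graph (ord[i].1)).foldl (pvBStep (ord[i].2 + 1)) (seen, ord)
        pvBScan graph fuel st.1 st.2 (i + 1)
      else ord

def compute_reset_order_alt (graph : List (String × List String)) (entry_ip : String) :
    List String × (List (String × Int)) :=
  let ord := pvBScan graph ((pvUni graph).length + 1) (PySem.Set.add PySem.Set.empty entry_ip) [(entry_ip, 0)] 0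
  let distances := PySem.Dict.ofList ord
  let max_dist := (PySem.List.maxD distances.values (fun v => v) 0) + 1
  -- buckets = [[] for _ in range(max_dist + 1)]; bucket indices are the distance values,
  -- which are provably in [0, max_dist], so '.toNat' indexing is exact here
  let buckets := (PySem.List.pyRange 0 (max_dist + 1) 1).map (fun _ => ([] : List String))
  let st := ((PySem.Dict.mk graph).keys).foldl
    (fun (st : PySem.Dict String Int × List (List String)) ip =>
      if st.1.contains ip then
        (st.1, st.2.modify (st.1.getD ip 0).toNat (fun b => b ++ [ip]))
      else
        (st.1.insert ip max_dist, st.2.modify max_dist.toNat (fun b => b ++ [ip])))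
    (distances, buckets)
  (st.2.reverse.foldl (fun acc b => acc ++ b) [], st.1.items)

-- ===== PRECONDITION & SPEC =====
def Spec_compute_reset_order (graph : List (String × List String)) (entry_ip : String) (out : List String × (List (String × Int))) : Prop := out = compute_reset_order_alt graph entry_ip
instance (graph : List (String × List String)) (entry_ip : String) (out : List String × (List (String × Int))) : Decidable (Spec_compute_reset_order graph entry_ip out) := by unfold Spec_compute_reset_order; infer_instance

-- ===== CLAIM (what is proved, stated in full; the proofs are below) =====
def Claim_equal_compute_reset_order : Prop := ∀ (graph : List (String × List String)) (entry_ip : String), Dom_compute_reset_order graph entry_ip → Spec_compute_reset_order graph entry_ip (compute_reset_order graph entry_ip)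

-- ===== LEMMAS AND PROOFS =====

lemma pvALoop_zero (graph : List (String × List String)) (d : PySem.Dict String Int)
    (q : List String) : pvALoop graph 0 d q = d := rfl

lemma pvALoop_succ_nil (graph : List (String × List String)) (fuel : Nat)
    (d : PySem.Dict String Int) : pvALoop graph (fuel + 1) d [] = d := rfl

lemma pvALoop_succ_cons (graph : List (String × List String)) (fuel : Nat)
    (d : PySem.Dict String Int) (current : String) (rest : List String) :
    pvALoop graph (fuel + 1) d (current :: rest) =
      pvALoop graph fuel
        ((pvNbrs graph current).foldl (pvStep (fun dd => dd.getD current 0 + 1)) (d, rest)).1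
        ((pvNbrs graph current).foldl (pvStep (fun dd => dd.getD current 0 + 1)) (d, rest)).2 :=
  rfl

lemma pvBScan_zero (graph : List (String × List String)) (seen : PySem.Set String)
    (ord : List (String × Int)) (i : Nat) : pvBScan graph 0 seen ord i = ord := rfl

lemma pvBScan_succ_stop (graph : List (String × List String)) (fuel : Nat)
    (seen : PySem.Set String) (ord : List (String × Int)) (i : Nat) (h : ¬ i < ord.length) :
    pvBScan graph (fuel + 1) seen ord i = ord := by
  rw [pvBScan]; simp [h]

lemma pvBScan_succ_step (graph : List (String × List String)) (fuel : Nat)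
    (seen : PySem.Set String) (ord : List (String × Int)) (i : Nat) (h : i < ord.length) :
    pvBScan graph (fuel + 1) seen ord i =
      pvBScan graph fuel
        ((pvNbrs graph (ord[i].1)).foldl (pvBStep (ord[i].2 + 1)) (seen, ord)).1
        ((pvNbrs graph (ord[i].1)).foldl (pvBStep (ord[i].2 + 1)) (seen, ord)).2 (i + 1) := by
  rw [pvBScan]; simp [h]

-- inner loop of A equals the same loop with the constant value level + 1
lemma pvInner_eq (current : String) (level : Int) :
    ∀ (ns : List String) (d : PySem.Dict String Int) (q : List String),
      d.get? current = some level →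
      ns.foldl (pvStep (fun dd => dd.getD current 0 + 1)) (d, q) =
        ns.foldl (pvStep (fun _ => level + 1)) (d, q) := by
  intro ns
  induction ns with
  | nil => intro d q _; simp
  | cons n ns ih =>
      intro d q h
      simp only [List.foldl_cons]
      by_cases hc : d.contains n = false
      · have hval : d.getD current 0 + 1 = level + 1 := by
          rw [PySem.Dict.getD_eq_get?_getD, h]; rfl
        have h1 : pvStep (fun dd => dd.getD current 0 + 1) (d, q) n
            = (d.insert n (level + 1), q ++ [n]) := by
          simp [pvStep, hc, hval]
        have h2 : pvStep (fun _ => level + 1) (d, q) n = (d.insert n (level + 1), q ++ [n]) := by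
          simp [pvStep, hc]
        rw [h1, h2]
        apply ih
        have hne : current ≠ n := by
          intro he; subst he
          rw [PySem.Dict.contains_eq_isSome_get?, h] at hc; simp at hc
        rw [PySem.Dict.get?_insert_of_ne d (level + 1) hne]; exact h
      · have h1 : pvStep (fun dd => dd.getD current 0 + 1) (d, q) n = (d, q) := by
          simp [pvStep] at hc ⊢; simp [hc]
        have h2 : pvStep (fun _ => level + 1) (d, q) n = (d, q) := by
          simp [pvStep] at hc ⊢; simp [hc]
        rw [h1, h2]; exact ih d q h

-- a dict's contains test agrees with membership of the key list carried by B
lemma pvContains_eq (d : PySem.Dict String Int) (ord : List (String × Int))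
    (h : d.items = ord) (n : String) :
    d.contains n = PySem.Set.contains (ord.map Prod.fst) n := by
  have hk : d.keys = ord.map Prod.fst := by
    show d.items.map _ = _; rw [h]
  rw [Bool.eq_iff_iff, PySem.Dict.contains_iff_mem_keys]
  rw [PySem.Set.contains_iff]
  rw [hk]

-- joint correspondence of A's and B's inner folds over one node's neighbour list
lemma pvFoldCorr (w : Int) :
    ∀ (ns : List String) (d : PySem.Dict String Int) (q : List String)
      (ord : List (String × Int)), d.items = ord →
      (ns.foldl (pvStep (fun _ => w)) (d, q)).1.items
          = (ns.foldl (pvBStep w) (ord.map Prod.fst, ord)).2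
      ∧ ∃ Δ : List (String × Int),
          (ns.foldl (pvBStep w) (ord.map Prod.fst, ord)).2 = ord ++ Δ
          ∧ (ns.foldl (pvStep (fun _ => w)) (d, q)).2 = q ++ Δ.map Prod.fst := by
  intro ns
  induction ns with
  | nil => intro d q ord h; exact ⟨h, [], by simp⟩
  | cons n ns ih =>
      intro d q ord h
      simp only [List.foldl_cons]
      by_cases hc : d.contains n = false
      · have hcB : PySem.Set.contains (ord.map Prod.fst) n = false := by
          rw [← pvContains_eq d ord h]; exact hc
        have hns : n ∉ ord.map Prod.fst := by
          intro hmem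
          have h2 := (PySem.Set.contains_iff _ _).mpr hmem
          rw [hcB] at h2; exact Bool.false_ne_true h2
        have hA : pvStep (fun _ => w) (d, q) n = (d.insert n w, q ++ [n]) := by
          simp [pvStep, hc]
        have hB : pvBStep w (ord.map Prod.fst, ord) n
            = ((ord ++ [(n, w)]).map Prod.fst, ord ++ [(n, w)]) := by
          simp [pvBStep, PySem.Set.add, hns]
        rw [hA, hB]
        have hitems : (d.insert n w).items = ord ++ [(n, w)] := by
          rw [PySem.Dict.items_insert_of_not_contains d w hc, h]
        obtain ⟨h1, Δ, h2, h3⟩ := ih (d.insert n w) (q ++ [n]) (ord ++ [(n, w)]) hitems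
        refine ⟨h1, (n, w) :: Δ, ?_, ?_⟩
        · rw [h2]; simp
        · rw [h3]; simp
      · have hcB : ¬ PySem.Set.contains (ord.map Prod.fst) n = false := by
          rw [← pvContains_eq d ord h]; exact hc
        have hA : pvStep (fun _ => w) (d, q) n = (d, q) := by
          simp [pvStep] at hc ⊢; simp [hc]
        have hB : pvBStep w (ord.map Prod.fst, ord) n = (ord.map Prod.fst, ord) := by
          simp [pvBStep] at hcB ⊢; simp [hcB]
        rw [hA, hB]
        exact ih d q ord h

-- B's inner fold: the visited set stays the key list, the list only grows,
-- the visited set stays duplicate-free, distances stay nonnegative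
lemma pvBFold_facts (w : Int) :
    ∀ (ns : List String) (s : PySem.Set String) (ord : List (String × Int)),
      s = ord.map Prod.fst →
      (ns.foldl (pvBStep w) (s, ord)).1 = (ns.foldl (pvBStep w) (s, ord)).2.map Prod.fst
      ∧ ord <+: (ns.foldl (pvBStep w) (s, ord)).2
      ∧ (s.Nodup → (ns.foldl (pvBStep w) (s, ord)).1.Nodup)
      ∧ (0 ≤ w → (∀ p ∈ ord, 0 ≤ p.2) → ∀ p ∈ (ns.foldl (pvBStep w) (s, ord)).2, 0 ≤ p.2) := by
  intro ns
  induction ns with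
  | nil => intro s ord h; exact ⟨h, List.prefix_refl _, fun hn => hn, fun _ h2 => h2⟩
  | cons n ns ih =>
      intro s ord h
      simp only [List.foldl_cons]
      by_cases hc : PySem.Set.contains s n = false
      · have hns : n ∉ s := by
          intro hmem
          have h2 := (PySem.Set.contains_iff _ _).mpr hmem
          rw [hc] at h2; exact Bool.false_ne_true h2
        have hB : pvBStep w (s, ord) n = (s ++ [n], ord ++ [(n, w)]) := by
          simp [pvBStep, PySem.Set.add, hns]
        rw [hB]
        have h' : s ++ [n] = (ord ++ [(n, w)]).map Prod.fst := by rw [h]; simp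
        obtain ⟨i1, i2, i3, i4⟩ := ih (s ++ [n]) (ord ++ [(n, w)]) h'
        refine ⟨i1, ?_, ?_, ?_⟩
        · exact (List.prefix_append ord [(n, w)]).trans i2
        · intro hnd
          apply i3
          rw [List.nodup_append]
          refine ⟨hnd, by simp, ?_⟩
          intro a ha b hb
          simp at hb; subst hb
          intro hab; subst hab; exact hns ha
        · intro hw hord
          apply i4 hw
          intro p hp
          rcases List.mem_append.mp hp with hp | hp
          · exact hord p hp
          · simp at hp; subst hp; simpa using hw
      · have hB : pvBStep w (s, ord) n = (s, ord) := by
          simp [pvBStep] at hc ⊢; simp [hc]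
        rw [hB]
        exact ih s ord h

lemma pvBScan_facts (graph : List (String × List String)) :
    ∀ (fuel : Nat) (seen : PySem.Set String) (ord : List (String × Int)) (i : Nat),
      seen = ord.map Prod.fst → seen.Nodup → (∀ p ∈ ord, 0 ≤ p.2) →
      (ord <+: pvBScan graph fuel seen ord i)
      ∧ ((pvBScan graph fuel seen ord i).map Prod.fst).Nodup
      ∧ (∀ p ∈ pvBScan graph fuel seen ord i, 0 ≤ p.2) := by
  intro fuel
  induction fuel with
  | zero =>
      intro seen ord i hseen hnd hnn
      rw [pvBScan_zero]
      exact ⟨List.prefix_refl _, hseen ▸ hnd, hnn⟩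
  | succ fuel ih =>
      intro seen ord i hseen hnd hnn
      by_cases h : i < ord.length
      · rw [pvBScan_succ_step graph fuel seen ord i h]
        have hw : 0 ≤ ord[i].2 + 1 := by
          have := hnn _ (List.getElem_mem h); omega
        obtain ⟨f1, f2, f3, f4⟩ :=
          pvBFold_facts (ord[i].2 + 1) (pvNbrs graph (ord[i].1)) seen ord hseen
        obtain ⟨r1, r2, r3⟩ := ih _ _ (i + 1) f1 (f3 hnd) (f4 hw hnn)
        exact ⟨f2.trans r1, r2, r3⟩
      · rw [pvBScan_succ_stop graph fuel seen ord i h]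
        exact ⟨List.prefix_refl _, hseen ▸ hnd, hnn⟩

-- master lemma: A's queue loop computes exactly the items list B's indexed scan builds
lemma pvMaster (graph : List (String × List String)) :
    ∀ (fuel : Nat) (d : PySem.Dict String Int) (q : List String)
      (ord : List (String × Int)) (i : Nat),
        d.items = ord → ((ord.map Prod.fst).Nodup) → i ≤ ord.length →
        q = (ord.drop i).map Prod.fst →
        (pvALoop graph fuel d q).items = pvBScan graph fuel (ord.map Prod.fst) ord i := by
  intro fuel
  induction fuel with
  | zero =>
      intro d q ord i hitems _ _ _
      rw [pvALoop_zero, pvBScan_zero]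
      exact hitems
  | succ fuel ih =>
      intro d q ord i hitems hnd hi hq
      cases q with
      | nil =>
          rw [pvALoop_succ_nil]
          have hlen : ord.length ≤ i := by
            have hl := congrArg List.length hq
            simp at hl
            omega
          rw [pvBScan_succ_stop graph fuel _ ord i (by omega)]
          exact hitems
      | cons current rest =>
          have hlt : i < ord.length := by
            by_contra hge
            rw [List.drop_eq_nil_of_le (by omega)] at hq
            simp at hq
          rw [List.drop_eq_getElem_cons hlt, List.map_cons] at hq
          rw [List.cons_eq_cons] at hq
          obtain ⟨hcur, hrest⟩ := hq
          have hkeys : d.keys = ord.map Prod.fst := by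
            show d.items.map _ = _; rw [hitems]
          have hget : d.get? current = some (ord[i].2) := by
            apply PySem.Dict.get?_of_mem_items
            · rw [hitems, hcur]
              simp
            · rw [hkeys]; exact hnd
          have hinner := pvInner_eq current (ord[i].2) (pvNbrs graph current) d rest hget
          obtain ⟨hAit, Δ, hΔ1, hΔ2⟩ :=
            pvFoldCorr (ord[i].2 + 1) (pvNbrs graph current) d rest ord hitems
          obtain ⟨f1, f2, f3, f4⟩ :=
            pvBFold_facts (ord[i].2 + 1) (pvNbrs graph current) (ord.map Prod.fst) ord rfl
          rw [← hinner] at hAit hΔ2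
          have hseen' : (List.foldl (pvBStep (ord[i].2 + 1)) (ord.map Prod.fst, ord)
              (pvNbrs graph current)).1 = (ord ++ Δ).map Prod.fst := by
            rw [f1, hΔ1]
          have happ := ih
            ((pvNbrs graph current).foldl (pvStep (fun dd => dd.getD current 0 + 1)) (d, rest)).1
            ((pvNbrs graph current).foldl (pvStep (fun dd => dd.getD current 0 + 1)) (d, rest)).2
            (ord ++ Δ) (i + 1)
            (by rw [hAit, hΔ1])
            (by rw [← hseen']; exact f3 hnd)
            (by rw [List.length_append]; omega)
            (by rw [hΔ2, hrest, List.drop_append_of_le_length (by omega), List.map_append])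
          rw [pvALoop_succ_cons, pvBScan_succ_step graph fuel _ ord i hlt, ← hcur, hseen', hΔ1]
          exact happ

-- max(xs, default=0) dominates every member
lemma pvMaxD_isMax (xs : List Int) (v : Int) (hv : v ∈ xs) :
    v ≤ PySem.List.maxD xs (fun y => y) 0 := by
  cases h : PySem.List.max? xs (fun y => y) with
  | none => rw [PySem.List.max?_eq_none_iff] at h; subst h; simp at hv
  | some m =>
      have := PySem.List.max?_isMax h v hv
      simpa [PySem.List.maxD, h] using this

-- A's second pass never changes an existing value
lemma pvAfold_pres (M : Int) :
    ∀ (ips : List String) (d : PySem.Dict String Int) (k : String), k ∉ ips →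
      (ips.foldl (fun d ip => if d.contains ip = false then d.insert ip M else d) d).getD k 0
        = d.getD k 0 := by
  intro ips
  induction ips with
  | nil => intro d k _; rfl
  | cons ip rest ih =>
      intro d k hk
      simp only [List.foldl_cons]
      have hne : k ≠ ip := by intro he; exact hk (by simp [he])
      have hrest : k ∉ rest := fun hr => hk (by simp [hr])
      rw [ih _ k hrest]
      by_cases hc : d.contains ip = false
      · rw [if_pos hc, PySem.Dict.getD_insert_of_ne d M 0 hne]
      · rw [if_neg hc]

-- one step of the second pass does not change the "final value" seen by later keys
lemma pvFval (d : PySem.Dict String Int) (ip : String) (M : Int) (x : String) :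
    (if ((if d.contains ip = false then d.insert ip M else d).contains x) then
        (if d.contains ip = false then d.insert ip M else d).getD x 0 else M)
      = (if d.contains x then d.getD x 0 else M) := by
  by_cases hc : d.contains ip = false
  · rw [if_pos hc]
    by_cases hx : x = ip
    · subst hx
      rw [PySem.Dict.contains_insert_self, PySem.Dict.getD_insert_self]
      simp [hc]
    · rw [PySem.Dict.contains_insert, PySem.Dict.getD_insert_of_ne d M 0 hx]
      have : (x == ip) = false := by simp [hx]
      rw [this]
      simp
  · rw [if_neg hc]

-- value of A's second pass on a processed key
lemma pvAfold_getD (M : Int) :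
    ∀ (ips : List String) (d : PySem.Dict String Int) (k : String), k ∈ ips →
      (ips.foldl (fun d ip => if d.contains ip = false then d.insert ip M else d) d).getD k 0
        = (if d.contains k then d.getD k 0 else M) := by
  intro ips
  induction ips with
  | nil => intro d k hk; simp at hk
  | cons ip rest ih =>
      intro d k hk
      simp only [List.foldl_cons]
      by_cases hkr : k ∈ rest
      · rw [ih _ k hkr, pvFval]
      · have hkip : k = ip := by
          rcases List.mem_cons.mp hk with h | h
          · exact h
          · exact absurd h hkr
        subst hkip
        rw [pvAfold_pres M rest _ k hkr]
        by_cases hc : d.contains k = false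
        · rw [if_pos hc, PySem.Dict.getD_insert_self]
          simp [hc]
        · rw [if_neg hc]
          simp at hc
          simp [hc]

-- B's fused pass is A's dict pass paired with a pure bucket pass
lemma pvPostCorr (M : Int) :
    ∀ (ips : List String) (d : PySem.Dict String Int) (bs : List (List String)),
      ips.foldl
        (fun (st : PySem.Dict String Int × List (List String)) ip =>
          if st.1.contains ip then
            (st.1, st.2.modify (st.1.getD ip 0).toNat (fun b => b ++ [ip]))
          else
            (st.1.insert ip M, st.2.modify M.toNat (fun b => b ++ [ip]))) (d, bs)
      = (ips.foldl (fun d ip => if d.contains ip = false then d.insert ip M else d) d,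
         ips.foldl
           (fun bs ip => bs.modify (if d.contains ip then d.getD ip 0 else M).toNat
             (fun b => b ++ [ip])) bs) := by
  intro ips
  induction ips with
  | nil => intro d bs; rfl
  | cons ip rest ih =>
      intro d bs
      simp only [List.foldl_cons]
      by_cases hc : d.contains ip = true
      · rw [if_pos hc]
        have h1 : (if d.contains ip = false then d.insert ip M else d) = d := by
          simp [hc]
        rw [h1, if_pos (by rw [hc])]
        exact ih d _
      · have hcf : d.contains ip = false := by simpa using hc
        rw [if_neg hc, if_pos hcf]
        have h2 : (if d.contains ip then d.getD ip 0 else M) = M := by simp [hcf]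
        rw [h2]
        rw [ih (d.insert ip M) _]
        have h3 : rest.foldl
            (fun bs x => bs.modify (if (d.insert ip M).contains x then
              (d.insert ip M).getD x 0 else M).toNat (fun b => b ++ [x]))
            (bs.modify M.toNat (fun b => b ++ [ip]))
          = rest.foldl
            (fun bs x => bs.modify (if d.contains x then d.getD x 0 else M).toNat
              (fun b => b ++ [x]))
            (bs.modify M.toNat (fun b => b ++ [ip])) := by
          apply PySem.List.foldl_congr_mem
          intro acc x _
          have := pvFval d ip M x
          rw [show (if d.contains ip = false then d.insert ip M else d)
              = d.insert ip M from by rw [if_pos hcf]] at this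
          rw [this]
        rw [h3]

lemma pvInsertBy_split (before : String → String → Bool) :
    ∀ (A B : List String) (x : String),
      (∀ a ∈ A, before x a = false) → (∀ b ∈ B, before x b = true) →
      PySem.List.insertBy before x (A ++ B) = A ++ x :: B := by
  intro A
  induction A with
  | nil =>
      intro B x _ hB
      cases B with
      | nil => simp [PySem.List.insertBy]
      | cons b bs =>
          have hb := hB b (by simp)
          simp [PySem.List.insertBy, hb]
  | cons a as ihA =>
      intro B x hA hB
      have ha := hA a (by simp)
      have h1 : PySem.List.insertBy before x ((a :: as) ++ B)
          = a :: PySem.List.insertBy before x (as ++ B) := by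
        simp [PySem.List.insertBy, ha]
      rw [h1, ihA B x (fun a' h' => hA a' (by simp [h'])) hB]
      simp

lemma pvRevFlat (T D : List (List String)) (m : List String) :
    (T ++ m :: D).reverse.flatten = D.reverse.flatten ++ (m ++ T.reverse.flatten) := by
  simp [List.reverse_append, List.flatten_append, List.append_assoc]

-- the stable insertion sort with key -k over xs is the descending concatenation of
-- the buckets filled by index k
lemma pvSortFold (k : String → Int) :
    ∀ (xs : List String) (bs : List (List String)) (acc : List String),
      acc = bs.reverse.flatten →
      (∀ (j : Nat) (h : j < bs.length), ∀ y ∈ bs[j], k y = (j : Int)) →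
      (∀ x ∈ xs, 0 ≤ k x ∧ (k x).toNat < bs.length) →
      xs.foldl (fun acc x =>
          PySem.List.insertBy (fun a b => decide (-(k a) < -(k b))) x acc) acc
        = ((xs.foldl (fun bs x => bs.modify (k x).toNat (fun b => b ++ [x])) bs).reverse).flatten := by
  intro xs
  induction xs with
  | nil =>
      intro bs acc hacc _ _
      simpa using hacc
  | cons x xs ih =>
      intro bs acc hacc hbuck hbound
      obtain ⟨hx0, hxL⟩ := hbound x (by simp)
      have hkx : k x = (((k x).toNat : Nat) : Int) := by omega
      simp only [List.foldl_cons]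
      have hsplit : bs = bs.take (k x).toNat ++ bs[(k x).toNat] :: bs.drop ((k x).toNat + 1) := by
        conv_lhs => rw [← List.take_append_drop (k x).toNat bs]
        rw [List.drop_eq_getElem_cons hxL]
      have haccd : acc = (bs.drop ((k x).toNat + 1)).reverse.flatten
          ++ (bs[(k x).toNat] ++ (bs.take (k x).toNat).reverse.flatten) := by
        rw [hacc]; conv_lhs => rw [hsplit]
        exact pvRevFlat _ _ _
      have hins : PySem.List.insertBy (fun a b => decide (-(k a) < -(k b))) x acc
          = ((bs.drop ((k x).toNat + 1)).reverse.flatten ++ bs[(k x).toNat])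
            ++ x :: (bs.take (k x).toNat).reverse.flatten := by
        rw [haccd, ← List.append_assoc]
        apply pvInsertBy_split
        · intro a ha
          rcases List.mem_append.mp ha with ha | ha
          · obtain ⟨l, hl, hal⟩ := List.mem_flatten.mp ha
            rw [List.mem_reverse] at hl
            obtain ⟨m, hm, hlm⟩ := List.mem_iff_getElem.mp hl
            have hglen : (k x).toNat + 1 + m < bs.length := by
              simp [List.length_drop] at hm; omega
            have hka : k a = (((k x).toNat + 1 + m : Nat) : Int) := by
              apply hbuck ((k x).toNat + 1 + m) hglen
              rw [← List.getElem_drop (h := by simpa using hm)]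
              rw [hlm]; exact hal
            simp only [decide_eq_false_iff_not]
            rw [hka, hkx]
            omega
          · have hka : k a = (((k x).toNat : Nat) : Int) := hbuck (k x).toNat hxL a ha
            simp only [decide_eq_false_iff_not]
            rw [hka, hkx]
            omega
        · intro b hb
          obtain ⟨l, hl, hbl⟩ := List.mem_flatten.mp hb
          rw [List.mem_reverse] at hl
          obtain ⟨m, hm, hlm⟩ := List.mem_iff_getElem.mp hl
          have hmlt : m < (k x).toNat := by simp [List.length_take] at hm; omega
          have hkb : k b = ((m : Nat) : Int) := by
            apply hbuck m (by omega)
            rw [← List.getElem_take (j := (k x).toNat) (h := by simp; omega)]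
            rw [hlm]; exact hbl
          simp only [decide_eq_true_eq]
          rw [hkb, hkx]
          omega
      rw [hins]
      have hbs' : bs.modify (k x).toNat (fun b => b ++ [x])
          = bs.take (k x).toNat ++ (bs[(k x).toNat] ++ [x]) :: bs.drop ((k x).toNat + 1) :=
        List.modify_eq_take_cons_drop hxL
      have hacc' : ((bs.drop ((k x).toNat + 1)).reverse.flatten ++ bs[(k x).toNat])
            ++ x :: (bs.take (k x).toNat).reverse.flatten
          = (bs.modify (k x).toNat (fun b => b ++ [x])).reverse.flatten := by
        rw [hbs', pvRevFlat]
        simp [List.append_assoc]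
      rw [hacc']
      apply ih
      · rfl
      · intro j hj y hy
        rw [List.getElem_modify] at hy
        by_cases hjj : (k x).toNat = j
        · rw [if_pos hjj] at hy
          subst hjj
          rcases List.mem_append.mp hy with hy | hy
          · exact hbuck (k x).toNat hxL y hy
          · simp at hy; subst hy
            exact hkx
        · rw [if_neg hjj] at hy
          exact hbuck j (by simpa [List.length_modify] using hj) y hy
      · intro x' hx'
        have := hbound x' (by simp [hx'])
        simpa [List.length_modify] using this

-- ===== VERDICT (by name: the statement is the Claim_ definition above) =====
theorem compute_reset_order_spec : Claim_equal_compute_reset_order := by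
  intro graph entry_ip _
  unfold Spec_compute_reset_order
  show compute_reset_order graph entry_ip = compute_reset_order_alt graph entry_ip
  -- the BFS loops agree: A's dict items are exactly B's discovery list
  have hmaster : (pvALoop graph ((pvUni graph).length + 1)
        (PySem.Dict.empty.insert entry_ip 0) [entry_ip]).items
      = pvBScan graph ((pvUni graph).length + 1)
        (PySem.Set.add PySem.Set.empty entry_ip) [(entry_ip, 0)] 0 := by
    exact pvMaster graph ((pvUni graph).length + 1) (PySem.Dict.empty.insert entry_ip 0)
      [entry_ip] [(entry_ip, 0)] 0 rfl (by simp) (by simp) rfl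
  obtain ⟨hpre, hndF, hnnF⟩ := pvBScan_facts graph ((pvUni graph).length + 1)
    (PySem.Set.add PySem.Set.empty entry_ip) [(entry_ip, 0)] 0 rfl
    (List.nodup_singleton entry_ip) (by simp)
  set ordF := pvBScan graph ((pvUni graph).length + 1)
    (PySem.Set.add PySem.Set.empty entry_ip) [(entry_ip, 0)] 0 with hordF
  set dA := pvALoop graph ((pvUni graph).length + 1)
    (PySem.Dict.empty.insert entry_ip 0) [entry_ip] with hdA
  obtain ⟨tF, htF⟩ := hpre
  have hAvalues : dA.values = ordF.map Prod.snd := by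
    show dA.items.map _ = _
    rw [hmaster]
  have hofList : (PySem.Dict.ofList ordF).items = ordF := by
    have h := PySem.Dict.items_foldl_insert_fresh ordF Prod.fst Prod.snd
      PySem.Dict.empty (fun a _ => rfl) hndF
    simpa using h
  have hdict : PySem.Dict.ofList ordF = dA := by
    apply PySem.Dict.ext
    rw [hofList, hmaster]
  have hvalsnn : ∀ v ∈ dA.values, 0 ≤ v := by
    intro v hv
    rw [hAvalues] at hv
    obtain ⟨p, hp, hps⟩ := List.mem_map.mp hv
    rw [← hps]; exact hnnF p hp
  have hzero : (0 : Int) ∈ dA.values := by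
    rw [hAvalues, ← htF]
    simp
  simp only [compute_reset_order, compute_reset_order_alt]
  rw [hdict]
  set M := PySem.List.maxD dA.values (fun v => v) 0 + 1 with hMdef
  have hM1 : 1 ≤ M := by
    have := pvMaxD_isMax dA.values 0 hzero
    omega
  have hMmax : ∀ v ∈ dA.values, v ≤ M - 1 := by
    intro v hv
    have := pvMaxD_isMax dA.values v hv
    omega
  set all_ips := (PySem.Dict.mk graph).keys with hips
  set buckets0 := (PySem.List.pyRange 0 (M + 1) 1).map (fun _ => ([] : List String))
    with hbuck0
  rw [pvPostCorr M all_ips dA buckets0]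
  set dA2 := all_ips.foldl
    (fun d ip => if d.contains ip = false then d.insert ip M else d) dA with hdA2
  have hkey : ∀ x ∈ all_ips, dA2.getD x 0 = (if dA.contains x then dA.getD x 0 else M) :=
    fun x hx => pvAfold_getD M all_ips dA x hx
  have hbound : ∀ x ∈ all_ips, 0 ≤ dA2.getD x 0 ∧ (dA2.getD x 0).toNat < buckets0.length := by
    intro x hx
    simp only [hkey x hx]
    have hlen : buckets0.length = (M + 1).toNat := by
      rw [hbuck0, List.length_map, PySem.List.length_pyRange_one]
      norm_num
    rw [hlen]
    by_cases hc : dA.contains x = true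
    · rw [if_pos hc]
      rw [PySem.Dict.contains_eq_isSome_get?] at hc
      obtain ⟨v, hv⟩ := Option.isSome_iff_exists.mp hc
      rw [PySem.Dict.getD_of_get?_eq_some dA 0 hv]
      have hmem : v ∈ dA.values := by
        have := PySem.Dict.mem_items_of_get?_eq_some dA hv
        exact List.mem_map.mpr ⟨(x, v), this, rfl⟩
      have h1 := hvalsnn v hmem
      have h2 := hMmax v hmem
      omega
    · rw [if_neg hc]
      omega
  have hsort := pvSortFold (fun ip => dA2.getD ip 0) all_ips buckets0 []
    (by
      symm
      rw [List.flatten_eq_nil_iff]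
      intro l hl
      rw [List.mem_reverse, hbuck0] at hl
      obtain ⟨_, _, hl2⟩ := List.mem_map.mp hl
      exact hl2.symm)
    (by
      intro j hj y hy
      simp only [hbuck0, List.getElem_map] at hy
      simp at hy)
    hbound
  have hcongr : all_ips.foldl
      (fun bs ip => bs.modify (if dA.contains ip then dA.getD ip 0 else M).toNat
        (fun b => b ++ [ip])) buckets0
    = all_ips.foldl
      (fun bs x => bs.modify ((fun ip => dA2.getD ip 0) x).toNat (fun b => b ++ [x]))
      buckets0 := by
    apply PySem.List.foldl_congr_mem
    intro acc x hx
    simp only [hkey x hx]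
  refine Prod.ext ?_ ?_
  · show PySem.List.sorted all_ips (fun ip => -(dA2.getD ip 0)) = _
    rw [PySem.List.sorted_eq_foldl_insertBy all_ips (fun ip => -(dA2.getD ip 0))]
    rw [PySem.List.foldl_append_eq_flatten, List.nil_append, hcongr]
    exact hsort
  · rfl
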